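-- pv_equiv track=rewrite | github.com/jasoria/advent-of-code | 2018/day2.py | cummulative_counter
-- ===== SOURCE A (Python) =====
-- from collections import Counter
--
-- def get_count_of_letters(set_of_letters):
--     return Counter(set_of_letters)
--
-- def counter_has(repetitions, count_of_letters):
--     result = False
--     for letter in count_of_letters:
--         number_of_repetitions = count_of_letters[letter]
--         if number_of_repetitions == repetitions:
--             result = True
--             break
--     return result
--
-- def cummulative_counter(repetitions, strings):
--     result = 0
--     for a_string in strings:
--         count_of_letters = get_count_of_letters(a_string)
--         add_to_result = counter_has(repetitions, count_of_letters)
--         if add_to_result: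
--             result += 1
--     return result
-- ===== SOURCE B (Python) =====
-- def cummulative_counter(repetitions, strings):
--     total = 0
--     for a_string in strings:
--         chars = sorted(a_string)
--         n = len(chars)
--         i = 0
--         found = False
--         while i < n:
--             j = i
--             while j < n and chars[j] == chars[i]:
--                 j += 1
--             if j - i == repetitions:
--                 found = True
--                 break
--             i = j
--         if found:
--             total += 1
--     return total
-- ===== Notes on version B (the rewrite author's own statement) =====
-- stated objective: faster
-- what changed: Per string, replaces the Counter hash table plus key scan with sorting the characters and a single run-length scan over the sorted list; the outer accumulation over strings is unchanged.
import Mathlib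
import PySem

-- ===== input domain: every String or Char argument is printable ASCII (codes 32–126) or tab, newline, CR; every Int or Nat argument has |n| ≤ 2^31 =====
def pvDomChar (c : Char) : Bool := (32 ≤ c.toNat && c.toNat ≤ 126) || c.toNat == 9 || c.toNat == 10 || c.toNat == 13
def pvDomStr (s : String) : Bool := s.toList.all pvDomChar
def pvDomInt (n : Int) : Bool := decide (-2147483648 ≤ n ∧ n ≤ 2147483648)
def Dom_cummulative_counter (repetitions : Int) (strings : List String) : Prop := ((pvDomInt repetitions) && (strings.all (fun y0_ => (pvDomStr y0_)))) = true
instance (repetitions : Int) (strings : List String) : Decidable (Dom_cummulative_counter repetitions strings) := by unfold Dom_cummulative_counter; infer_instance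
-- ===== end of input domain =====

-- B sorts each string's characters and counts run lengths in one pass instead of building a Counter; alternative algorithm, same cost class.

-- ===== PORT A =====
def get_count_of_letters (set_of_letters : List Char) : PySem.Dict Char Int :=
  PySem.Dict.counter set_of_letters

-- 'for letter in count_of_letters: … break' ported as recursion over the key list
def counter_has_loop (repetitions : Int) (d : PySem.Dict Char Int) : List Char → Bool
  | [] => false
  | letter :: rest =>
      if d.getD letter 0 == repetitions then true
      else counter_has_loop repetitions d rest

def counter_has (repetitions : Int) (d : PySem.Dict Char Int) : Bool :=
  counter_has_loop repetitions d d.keys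

def cummulative_counter (repetitions : Int) (strings : List String) : Int :=
  strings.foldl (fun result a_string =>
    let count_of_letters := get_count_of_letters a_string.toList
    let add_to_result := counter_has repetitions count_of_letters
    if add_to_result then result + 1 else result) 0

-- ===== PORT B =====
-- the inner while advances j over the run of chars equal to chars[i]; run length j-i, continue at j
def run_scan (repetitions : Int) : List Char → Bool
  | [] => false
  | c :: rest =>
      if ((1 + (rest.takeWhile (fun x => x == c)).length : Nat) : Int) == repetitions then true
      else run_scan repetitions (rest.dropWhile (fun x => x == c))
  termination_by l => l.length
  decreasing_by
    exact Nat.lt_succ_of_le (List.length_dropWhile_le _ _)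

def cummulative_counter_alt (repetitions : Int) (strings : List String) : Int :=
  strings.foldl (fun total a_string =>
    if run_scan repetitions (PySem.List.sorted a_string.toList (fun x => x) false) then total + 1
    else total) 0

-- ===== PRECONDITION & SPEC =====
def Spec_cummulative_counter (repetitions : Int) (strings : List String) (out : Int) : Prop := out = cummulative_counter_alt repetitions strings
instance (repetitions : Int) (strings : List String) (out : Int) : Decidable (Spec_cummulative_counter repetitions strings out) := by unfold Spec_cummulative_counter; infer_instance

-- ===== CLAIM (what is proved, stated in full; the proofs are below) =====
def Claim_equal_cummulative_counter : Prop := ∀ (repetitions : Int) (strings : List String), Dom_cummulative_counter repetitions strings → Spec_cummulative_counter repetitions strings (cummulative_counter repetitions strings)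

-- ===== LEMMAS AND PROOFS =====

lemma counter_has_loop_eq_any (repetitions : Int) (d : PySem.Dict Char Int) (ks : List Char) :
    counter_has_loop repetitions d ks = ks.any (fun k => d.getD k 0 == repetitions) := by
  induction ks with
  | nil => rfl
  | cons k ks ih =>
      simp only [counter_has_loop, List.any_cons]
      split_ifs with h
      · simp [h]
      · simp [h, ih]

lemma counter_has_iff (repetitions : Int) (cs : List Char) :
    counter_has repetitions (get_count_of_letters cs) = true ↔
      ∃ x ∈ cs, (cs.count x : Int) = repetitions := by
  simp only [counter_has, get_count_of_letters, counter_has_loop_eq_any,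
    PySem.Dict.keys_counter, PySem.Dict.getD_counter, List.any_eq_true]
  constructor
  · rintro ⟨x, hx, hp⟩
    exact ⟨x, (PySem.Set.mem_ofList cs x).mp hx, by simpa using hp⟩
  · rintro ⟨x, hx, hp⟩
    exact ⟨x, (PySem.Set.mem_ofList cs x).mpr hx, by simpa using hp⟩

lemma sorted_dropWhile_lt (c : Char) (rest : List Char)
    (h : (c :: rest).Pairwise (· ≤ ·)) :
    ∀ x ∈ rest.dropWhile (fun y => y == c), c < x := by
  induction rest with
  | nil => intro x hx; simp at hx
  | cons a rest ih =>
      intro x hx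
      rw [List.pairwise_cons] at h
      obtain ⟨hc, hrest⟩ := h
      rw [List.dropWhile_cons] at hx
      by_cases hac : (a == c) = true
      · rw [if_pos hac] at hx
        refine ih ?_ x hx
        rw [List.pairwise_cons]
        exact ⟨fun y hy => hc y (List.mem_cons_of_mem a hy), (List.pairwise_cons.mp hrest).2⟩
      · rw [if_neg hac] at hx
        have hca : c < a := lt_of_le_of_ne (hc a (List.mem_cons_self ..))
          (fun he => hac (by simp [he.symm]))
        rcases List.mem_cons.mp hx with rfl | hx'
        · exact hca
        · exact lt_of_lt_of_le hca ((List.pairwise_cons.mp hrest).1 x hx')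

lemma run_scan_iff_aux (repetitions : Int) :
    ∀ (n : Nat) (ys : List Char), ys.length ≤ n → ys.Pairwise (· ≤ ·) →
      (run_scan repetitions ys = true ↔ ∃ x ∈ ys, (ys.count x : Int) = repetitions) := by
  intro n
  induction n with
  | zero =>
      intro ys hlen _
      have : ys = [] := List.eq_nil_of_length_eq_zero (Nat.le_zero.mp hlen)
      subst this; simp [run_scan]
  | succ n ih =>
      intro ys hlen hsort
      match ys with
      | [] => simp [run_scan]
      | c :: rest =>
        have htkdr : rest.takeWhile (fun x => x == c) ++ rest.dropWhile (fun x => x == c) = rest :=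
          List.takeWhile_append_dropWhile
        set tk := rest.takeWhile (fun x => x == c) with htk_def
        set dr := rest.dropWhile (fun x => x == c) with hdr_def
        have htk : ∀ x ∈ tk, x = c := by
          intro x hx
          have := List.mem_takeWhile_imp hx
          exact eq_of_beq this
        have hdr : ∀ x ∈ dr, c < x := sorted_dropWhile_lt c rest hsort
        have hdrsort : dr.Pairwise (· ≤ ·) :=
          hsort.sublist ((List.dropWhile_sublist _).cons _)
        have hdrlen : dr.length ≤ n := by
          have h1 : dr.length ≤ rest.length := List.length_dropWhile_le _ _
          have h2 : rest.length + 1 ≤ n + 1 := by simpa using hlen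
          omega
        have hcount_tk : tk.count c = tk.length :=
          List.count_eq_length.mpr (fun b hb => (htk b hb).symm)
        have hcount_dr : dr.count c = 0 :=
          List.count_eq_zero.mpr (fun hc => lt_irrefl c (hdr c hc))
        have hcount_c : (c :: rest).count c = 1 + tk.length := by
          rw [List.count_cons_self, ← htkdr, List.count_append, hcount_tk, hcount_dr]
          omega
        have hcount_dr_mem : ∀ x ∈ dr, (c :: rest).count x = dr.count x := by
          intro x hx
          have hxc : x ≠ c := fun he => lt_irrefl c (he ▸ hdr x hx)
          have hcx : ¬ c = x := fun h => hxc h.symm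
          rw [← htkdr]
          simp [List.count_append,
            List.count_eq_zero.mpr (fun hxtk => hxc (htk x hxtk)), hcx]
        rw [run_scan]
        by_cases hcond : (((1 + tk.length : Nat) : Int) == repetitions) = true
        · rw [if_pos hcond]
          simp only [true_iff]
          refine ⟨c, List.mem_cons_self .., ?_⟩
          rw [hcount_c]
          exact_mod_cast eq_of_beq hcond
        · rw [if_neg hcond, ih dr hdrlen hdrsort]
          constructor
          · rintro ⟨x, hx, hv⟩
            exact ⟨x, List.mem_cons_of_mem c (htkdr ▸ List.mem_append_right tk hx),
              (hcount_dr_mem x hx) ▸ hv⟩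
          · rintro ⟨x, hx, hv⟩
            rcases List.mem_cons.mp hx with rfl | hx'
            · exfalso
              apply hcond
              rw [hcount_c] at hv
              exact beq_iff_eq.mpr (by exact_mod_cast hv)
            · rcases List.mem_append.mp (htkdr ▸ hx' : x ∈ tk ++ dr) with hxtk | hxdr
              · exfalso
                apply hcond
                have := htk x hxtk
                subst this
                rw [hcount_c] at hv
                exact beq_iff_eq.mpr (by exact_mod_cast hv)
              · exact ⟨x, hxdr, (hcount_dr_mem x hxdr) ▸ hv⟩

lemma per_string_eq (repetitions : Int) (cs : List Char) :
    counter_has repetitions (get_count_of_letters cs) =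
      run_scan repetitions (PySem.List.sorted cs (fun x => x) false) := by
  have hperm : (PySem.List.sorted cs (fun x => x) false).Perm cs :=
    PySem.List.sorted_perm cs (fun x => x) false
  have hsort : (PySem.List.sorted cs (fun x => x) false).Pairwise (· ≤ ·) := by
    simpa using PySem.List.sorted_pairwise (xs := cs) (key := fun x => x)
  rw [Bool.eq_iff_iff, counter_has_iff,
    run_scan_iff_aux repetitions (PySem.List.sorted cs (fun x => x) false).length _ le_rfl hsort]
  constructor
  · rintro ⟨x, hx, hv⟩
    exact ⟨x, hperm.mem_iff.mpr hx, by rw [hperm.count_eq]; exact hv⟩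
  · rintro ⟨x, hx, hv⟩
    exact ⟨x, hperm.mem_iff.mp hx, by rw [← hperm.count_eq]; exact hv⟩

-- ===== VERDICT (by name: the statement is the Claim_ definition above) =====
theorem cummulative_counter_spec : Claim_equal_cummulative_counter := by
  intro repetitions strings _
  unfold Spec_cummulative_counter cummulative_counter cummulative_counter_alt
  congr 1
  funext result a_string
  simp only [per_string_eq]
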